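-- pv_equiv track=rewrite | github.com/Algieba-dean/AutoVend | backend/agent/guardrails.py | _extract_mentioned_models
-- ===== SOURCE A (Python) =====
-- from typing import Any, Dict, List
--
-- def _extract_mentioned_models(
--     response: str,
--     known_models: List[str],
-- ) -> List[str]:
--     """Find which known car models are mentioned in the response."""
--     mentioned = []
--     resp_lower = response.lower()
--     for model in known_models:
--         if model.lower() in resp_lower:
--             mentioned.append(model)
--     return mentioned
-- ===== SOURCE B (Python) =====
-- def _extract_mentioned_models(response, known_models):
--     """Find which known car models are mentioned in the response.
--
--     Rabin-Karp-style window index: for each distinct length among the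
--     (lowercased) model names, slide a window of that length over the
--     lowercased response and collect the windows into a set; each model is
--     then answered by one set lookup, in known_models order."""
--     resp = response.lower()
--     pats = [m.lower() for m in known_models]
--     subs = set()
--     for L in set(len(p) for p in pats):
--         for i in range(len(resp) - L + 1):
--             subs.add(resp[i:i+L])
--     return [m for m, p in zip(known_models, pats) if p in subs]
-- ===== Notes on version B (the rewrite author's own statement) =====
-- stated objective: faster
-- what changed: A runs one whole-string substring search per model; B slides, for each distinct lowercased-name length, a window of that length over the lowercased response once, collects the windows into a hash set, and answers every model by a single set lookup, emitting in known_models order.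
import Mathlib
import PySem

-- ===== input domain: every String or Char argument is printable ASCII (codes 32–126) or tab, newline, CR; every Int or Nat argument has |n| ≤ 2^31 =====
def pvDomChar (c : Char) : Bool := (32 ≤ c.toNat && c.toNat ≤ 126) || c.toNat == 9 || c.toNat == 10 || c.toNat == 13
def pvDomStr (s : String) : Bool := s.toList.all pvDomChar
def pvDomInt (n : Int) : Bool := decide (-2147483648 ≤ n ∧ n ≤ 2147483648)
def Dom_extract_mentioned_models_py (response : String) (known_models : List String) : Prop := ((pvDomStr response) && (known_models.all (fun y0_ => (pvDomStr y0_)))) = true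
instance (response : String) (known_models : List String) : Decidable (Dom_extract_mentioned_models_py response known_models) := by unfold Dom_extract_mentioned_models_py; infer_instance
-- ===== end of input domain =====

-- B replaces A's one-substring-search-per-model with a window index: for each distinct
-- lowercased-name length it slides a window of that length over the lowercased response
-- once, collects the windows into a set, and answers every model by a single set lookup,
-- emitting in known_models order.

-- ===== PORT A =====
def extract_mentioned_models_py (response : String) (known_models : List String) : List String :=
  let resp_lower := PySem.Chars.lower response.toList
  known_models.foldl
    (fun mentioned model =>
      if PySem.Chars.isIn (PySem.Chars.lower model.toList) resp_lower then mentioned ++ [model]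
      else mentioned) []

-- ===== PORT B =====
def extract_mentioned_models_py_alt (response : String) (known_models : List String) : List String :=
  let resp := PySem.Chars.lower response.toList
  let pats := known_models.map (fun m => PySem.Chars.lower m.toList)
  -- 'for L in set(len(p) for p in pats): for i in range(len(resp) - L + 1): subs.add(resp[i:i+L])'
  -- (membership in 'subs' is iteration-order independent, so folding the length set in its
  -- construction order is exact)
  let lens : PySem.Set Int := PySem.Set.ofList (pats.map (fun p => (p.length : Int)))
  let subs : PySem.Set (List Char) :=
    lens.foldl
      (fun s L =>
        (PySem.List.pyRange 0 ((resp.length : Int) - L + 1) 1).foldl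
          (fun s i => PySem.Set.add s (PySem.List.slice resp (some i) (some (i + L)))) s)
      PySem.Set.empty
  -- '[m for m, p in zip(known_models, pats) if p in subs]'
  (known_models.zip pats).foldl
    (fun (acc : List String) mp => if subs.contains mp.2 then acc ++ [mp.1] else acc) []

-- ===== PRECONDITION & SPEC =====
def Spec_extract_mentioned_models_py (response : String) (known_models : List String) (out : List String) : Prop := out = extract_mentioned_models_py_alt response known_models
instance (response : String) (known_models : List String) (out : List String) : Decidable (Spec_extract_mentioned_models_py response known_models out) := by unfold Spec_extract_mentioned_models_py; infer_instance

-- ===== CLAIM (what is proved, stated in full; the proofs are below) =====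
def Claim_equal_extract_mentioned_models_py : Prop := ∀ (response : String) (known_models : List String), Dom_extract_mentioned_models_py response known_models → Spec_extract_mentioned_models_py response known_models (extract_mentioned_models_py response known_models)

-- ===== LEMMAS AND PROOFS =====

-- membership after a loop that only ever adds one element per step
lemma mem_foldl_add {ι α : Type} [BEq α] [LawfulBEq α] (l : List ι) (w : ι → α)
    (s0 : PySem.Set α) (y : α) :
    y ∈ l.foldl (fun s i => PySem.Set.add s (w i)) s0 ↔ y ∈ s0 ∨ ∃ i ∈ l, y = w i := by
  induction l generalizing s0 with
  | nil => simp
  | cons x t ih =>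
    simp only [List.foldl_cons, ih, PySem.Set.mem_add, List.mem_cons]
    constructor
    · rintro ((h | rfl) | ⟨i, hi, rfl⟩)
      · exact Or.inl h
      · exact Or.inr ⟨x, Or.inl rfl, rfl⟩
      · exact Or.inr ⟨i, Or.inr hi, rfl⟩
    · rintro (h | ⟨i, (rfl | hi), rfl⟩)
      · exact Or.inl (Or.inl h)
      · exact Or.inl (Or.inr rfl)
      · exact Or.inr ⟨i, hi, rfl⟩

-- membership after the outer loop over the length set
lemma mem_outer_fold {ι α : Type} [BEq α] (l : List ι)
    (g : PySem.Set α → ι → PySem.Set α) (Q : ι → Prop) (y : α)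
    (hg : ∀ s i, y ∈ g s i ↔ y ∈ s ∨ Q i) (s0 : PySem.Set α) :
    y ∈ l.foldl g s0 ↔ y ∈ s0 ∨ ∃ i ∈ l, Q i := by
  induction l generalizing s0 with
  | nil => simp
  | cons x t ih =>
    simp only [List.foldl_cons, ih, hg, List.mem_cons]
    constructor
    · rintro ((h | h) | ⟨i, hi, hQ⟩)
      · exact Or.inl h
      · exact Or.inr ⟨x, Or.inl rfl, h⟩
      · exact Or.inr ⟨i, Or.inr hi, hQ⟩
    · rintro (h | ⟨i, (rfl | hi), hQ⟩)
      · exact Or.inl (Or.inl h)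
      · exact Or.inl (Or.inr hQ)
      · exact Or.inr ⟨i, hi, hQ⟩

-- the window set answers a pattern whose length was indexed by 'occurs in resp'
lemma mem_subs (resp : List Char) (lens : List Int) (p : List Char)
    (hL : (p.length : Int) ∈ lens) (hnn : ∀ L ∈ lens, 0 ≤ L) :
    (p ∈ lens.foldl
      (fun s L =>
        (PySem.List.pyRange 0 ((resp.length : Int) - L + 1) 1).foldl
          (fun s i => PySem.Set.add s (PySem.List.slice resp (some i) (some (i + L)))) s)
      PySem.Set.empty) ↔ p <:+: resp := by
  rw [mem_outer_fold _ _
      (fun L => ∃ i ∈ PySem.List.pyRange 0 ((resp.length : Int) - L + 1) 1,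
        p = PySem.List.slice resp (some i) (some (i + L)))
      p (fun s L => mem_foldl_add _ _ s p)]
  have hempty : p ∈ (PySem.Set.empty : PySem.Set (List Char)) ↔ False := by
    simp [PySem.Set.empty]
  rw [hempty, false_or]
  constructor
  · rintro ⟨L, hLm, i, hi, rfl⟩
    rw [PySem.List.mem_pyRange_one] at hi
    have h0L := hnn L hLm
    rw [PySem.List.slice_toNat _ hi.1 (by omega)]
    exact ((resp.drop i.toNat).take_prefix _).isInfix.trans (resp.drop_suffix i.toNat).isInfix
  · intro hinf
    obtain ⟨t, hpre, hsuf⟩ := List.infix_iff_prefix_suffix.mp hinf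
    obtain ⟨j, hj⟩ : ∃ j : Nat, t = resp.drop j ∧ j + t.length = resp.length := by
      refine ⟨resp.length - t.length, ?_, ?_⟩
      · exact List.suffix_iff_eq_drop.mp hsuf
      · have := hsuf.length_le; omega
    have hplen : p.length ≤ t.length := hpre.length_le
    refine ⟨(p.length : Int), hL, (j : Int), ?_, ?_⟩
    · rw [PySem.List.mem_pyRange_one]
      constructor
      · exact Int.natCast_nonneg j
      · omega
    · rw [PySem.List.slice_toNat _ (Int.natCast_nonneg j) (by positivity)]
      have : ((j : Int) + (p.length : Int)).toNat - ((j : Int)).toNat = p.length := by omega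
      rw [this, Int.toNat_natCast, ← hj.1]
      exact List.prefix_iff_eq_take.mp hpre

-- a fold over zip (km, map f km) equals a fold over km when the guards agree pointwise
lemma foldl_zip_map (km : List String) (f : String → List Char)
    (C : List Char → Bool) (q : String → Bool) (acc : List String)
    (h : ∀ m ∈ km, C (f m) = q m) :
    (km.zip (km.map f)).foldl
        (fun (acc : List String) mp => if C mp.2 then acc ++ [mp.1] else acc) acc
      = km.foldl (fun acc m => if q m then acc ++ [m] else acc) acc := by
  induction km generalizing acc with
  | nil => simp
  | cons x t ih =>
    simp only [List.map_cons, List.zip_cons_cons, List.foldl_cons]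
    rw [h x List.mem_cons_self]
    exact ih _ (fun m hm => h m (List.mem_cons_of_mem _ hm))

-- ===== VERDICT (by name: the statement is the Claim_ definition above) =====
theorem extract_mentioned_models_py_spec : Claim_equal_extract_mentioned_models_py := by
  intro response known_models _
  unfold Spec_extract_mentioned_models_py extract_mentioned_models_py extract_mentioned_models_py_alt
  dsimp only
  rw [foldl_zip_map known_models (fun m => PySem.Chars.lower m.toList) _
      (fun m => PySem.Chars.isIn (PySem.Chars.lower m.toList) (PySem.Chars.lower response.toList)) []]
  intro m hm
  rw [Bool.eq_iff_iff, PySem.Set.contains_iff,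
    mem_subs (PySem.Chars.lower response.toList) _ _
      ((PySem.Set.mem_ofList _ _).mpr (List.mem_map.mpr
        ⟨PySem.Chars.lower m.toList, List.mem_map.mpr ⟨m, hm, rfl⟩, rfl⟩))
      (fun L hLm => by
        obtain ⟨p, _, rfl⟩ := List.mem_map.mp ((PySem.Set.mem_ofList _ _).mp hLm)
        exact Int.natCast_nonneg _),
    PySem.Chars.isIn_iff_infix]
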